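-- pv_equiv track=rewrite | github.com/data-wrangler/euler | euler76.py | get_to
-- ===== SOURCE A (Python) =====
-- def get_to(target,with_factors_less_than=None):
--     if target==0:
--         return[[]]
--     elif target==1:
--         return [[1]]
--     all_solutions=[]
--     if not with_factors_less_than or target<with_factors_less_than:
--         with_factors_less_than=target
--     for i in range(with_factors_less_than,0,-1):
--         this_solution=[i]
--         for rest_of_solution in get_to(target-i,i):
--             all_solutions.append(this_solution+rest_of_solution)
--     return all_solutions
-- ===== SOURCE B (Python) =====
-- def get_to(target, with_factors_less_than=None):
--     # Bottom-up dynamic programming: t[m][c] lists the partitions of m with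
--     # parts <= c (same descending-first-part DFS order as the recursion),
--     # each subproblem computed once and shared.  Partitions are kept as
--     # shared cons cells (part, rest) and only the returned ones are
--     # materialized as lists.
--     if target == 1:
--         return [[1]]
--     if not with_factors_less_than or target < with_factors_less_than:
--         with_factors_less_than = target
--     cap = with_factors_less_than
--     if target <= 0 or cap <= 0:
--         return [[]] if target == 0 else []
--     t = [[[None]]]
--     for m in range(1, target + 1):
--         row = [[]]
--         prev = []
--         for c in range(1, min(m, cap) + 1):
--             prev = [(c, q) for q in t[m - c][min(c, m - c)]] + prev
--             row.append(prev)
--         t.append(row)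
--     out = []
--     for cell in t[target][min(cap, target)]:
--         p = []
--         while cell is not None:
--             p.append(cell[0])
--             cell = cell[1]
--         out.append(p)
--     return out
-- ===== Notes on version B (the rewrite author's own statement) =====
-- stated objective: alternative
-- what changed: Replaces the top-down recursion, which recomputes the sub-partition lists of every (remainder, cap) pair for each context it occurs in, with a bottom-up dynamic-programming table t[m][c] holding the partitions of m with parts <= c as shared cons chains, filled once row by row, emitting the same lists in the same descending DFS order. Pre_ excludes the large targets with a positive (or defaulted) effective cap, on which A recurses one frame per part and raises RecursionError under CPython's default recursion limit before it can return.
import Mathlib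
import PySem

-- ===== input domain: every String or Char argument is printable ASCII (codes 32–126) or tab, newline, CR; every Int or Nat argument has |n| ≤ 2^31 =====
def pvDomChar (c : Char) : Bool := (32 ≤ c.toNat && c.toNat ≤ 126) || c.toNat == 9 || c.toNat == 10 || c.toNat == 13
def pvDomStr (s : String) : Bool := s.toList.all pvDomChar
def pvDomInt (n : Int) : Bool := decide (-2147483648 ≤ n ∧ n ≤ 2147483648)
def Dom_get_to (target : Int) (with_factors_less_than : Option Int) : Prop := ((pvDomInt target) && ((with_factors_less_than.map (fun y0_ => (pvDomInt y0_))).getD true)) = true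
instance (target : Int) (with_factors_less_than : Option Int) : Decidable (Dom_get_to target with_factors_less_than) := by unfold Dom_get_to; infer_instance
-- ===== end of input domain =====

-- B replaces A's top-down recursion, which recomputes every subproblem for each context,
-- with a bottom-up table t[m][c] of the partitions of m with parts ≤ c, filled once and
-- shared, in the same DFS order (objective: alternative; neither version mutates its arguments).

-- ===== PORT A =====
-- shared helper: the cap-normalisation lines
-- 'if not with_factors_less_than or target < with_factors_less_than: with_factors_less_than = target'
def pyCap (target : Int) (wf : Option Int) : Int :=
  match wf with
  | none => target
  | some w => if w = 0 ∨ target < w then target else w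

theorem pyCap_le (target : Int) (wf : Option Int) : pyCap target wf ≤ target ∨ pyCap target wf = target := by
  unfold pyCap
  cases wf with
  | none => right; rfl
  | some w => split <;> omega

theorem get_to_dec (target : Int) (wf : Option Int) (i : Int)
    (hi : i ∈ PySem.List.pyRange (pyCap target wf) 0 (-1)) :
    (target - i).toNat < target.toNat := by
  have h := PySem.List.mem_pyRange_neg_one.mp hi
  have hle := pyCap_le target wf
  omega

def get_to (target : Int) (with_factors_less_than : Option Int) : List (List Int) :=
  if target = 0 then [[]]
  else if target = 1 then [[1]]
  else
    -- all_solutions accumulated over 'for i in range(with_factors_less_than, 0, -1)'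
    (PySem.List.pyRange (pyCap target with_factors_less_than) 0 (-1)).attach.foldl
      (fun acc i => acc ++ (get_to (target - i.1) (some i.1)).map (fun rest => i.1 :: rest)) []
termination_by target.toNat
decreasing_by
  exact get_to_dec target with_factors_less_than i.1 i.2

-- ===== PORT B =====
-- one step of the inner loop 'for c in range(1, min(m, cap) + 1)': state = (row, prev), part value c = c0 + 1;
-- a partition is a chain of cons cells '(c, rest)', which is exactly a Lean 'List Int'
def rowStep (t : List (List (List (List Int)))) (m : Nat)
    (st : List (List (List Int)) × List (List Int)) (c0 : Nat) :
    List (List (List Int)) × List (List Int) :=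
  let c := c0 + 1
  let prev := ((t.getD (m - c) []).getD (min c (m - c)) []).map (fun q => ((c : Nat) : Int) :: q) ++ st.2
  (st.1 ++ [prev], prev)

-- the inner loop: builds row m of the table from the rows below it (kmax = min(m, cap))
def rowB (t : List (List (List (List Int)))) (m kmax : Nat) : List (List (List Int)) :=
  ((List.range kmax).foldl (rowStep t m) ([[]], [])).1

-- the materialisation loop 'while cell is not None: p.append(cell[0]); cell = cell[1]'
def consToList : List Int → List Int
  | [] => []
  | c :: q => c :: consToList q

def get_to_alt (target : Int) (with_factors_less_than : Option Int) : List (List Int) :=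
  if target = 1 then [[1]]
  else if target ≤ 0 ∨ pyCap target with_factors_less_than ≤ 0 then
    (if target = 0 then [[]] else [])
  else
    -- 'for m in range(1, target + 1): t.append(row)' then the materialised 't[target][min(cap, target)]'
    (((((List.range target.toNat).foldl
          (fun t m0 => t ++ [rowB t (m0 + 1) (min (m0 + 1) (pyCap target with_factors_less_than).toNat)])
          [[[[]]]]).getD
        target.toNat []).getD (min (pyCap target with_factors_less_than) target).toNat []).map consToList)

-- ===== PRECONDITION & SPEC =====
-- Pre_ excludes exactly the large targets with a positive (or defaulted) effective cap, on
-- which Python A never returns: it recurses one frame per part, a partition of target may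
-- have `target` parts, and A overruns CPython's default recursion limit and raises
-- RecursionError before its enumeration can complete. (A negative explicit cap empties A's
-- loop, so those inputs return [] at any size and stay inside Pre_.)
def Pre_get_to (target : Int) (with_factors_less_than : Option Int) : Prop :=
  target ≤ 998 ∨ with_factors_less_than.getD 0 < 0
instance (target : Int) (with_factors_less_than : Option Int) : Decidable (Pre_get_to target with_factors_less_than) := by unfold Pre_get_to; infer_instance
def pvWitness_get_to : Int × Option Int := (6, some 3)

def Spec_get_to (target : Int) (with_factors_less_than : Option Int) (out : List (List Int)) : Prop := out = get_to_alt target with_factors_less_than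
instance (target : Int) (with_factors_less_than : Option Int) (out : List (List Int)) : Decidable (Spec_get_to target with_factors_less_than out) := by unfold Spec_get_to; infer_instance

-- ===== CLAIM (what is proved, stated in full; the proofs are below) =====
def Claim_equal_get_to : Prop := ∀ (target : Int) (with_factors_less_than : Option Int), Dom_get_to target with_factors_less_than → Pre_get_to target with_factors_less_than → Spec_get_to target with_factors_less_than (get_to target with_factors_less_than)

-- ===== LEMMAS AND PROOFS =====

theorem pyRange_min_dec (rem nxt j : Int) (hj : j ∈ PySem.List.pyRange (min nxt rem) 0 (-1)) :
    (rem - j).toNat < rem.toNat := by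
  have h := PySem.List.mem_pyRange_neg_one.mp hj
  have h2 : min nxt rem ≤ rem := min_le_right _ _
  omega

-- the partitions of rem with parts ≤ min nxt rem, in A's order (reference function)
def Psub (rem nxt : Int) : List (List Int) :=
  if rem = 0 then [[]]
  else if min nxt rem < 1 then []
  else ((PySem.List.pyRange (min nxt rem) 0 (-1)).attach.map
      (fun j => (Psub (rem - j.1) j.1).map (fun r => j.1 :: r))).flatten
termination_by rem.toNat
decreasing_by
  exact pyRange_min_dec rem nxt j.1 j.2

theorem Psub_eq (rem nxt : Int) (h0 : ¬ rem = 0) (h1 : 1 ≤ min nxt rem) :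
    Psub rem nxt = ((PySem.List.pyRange (min nxt rem) 0 (-1)).map
      (fun j => (Psub (rem - j) j).map (fun r => j :: r))).flatten := by
  rw [Psub, if_neg h0, if_neg (by omega)]
  rw [List.attach_map_val (l := PySem.List.pyRange (min nxt rem) 0 (-1))
    (f := fun j => (Psub (rem - j) j).map (fun r => j :: r))]

theorem Psub_zero (nxt : Int) : Psub 0 nxt = [[]] := by
  rw [Psub]
  simp

theorem Psub_nil (rem nxt : Int) (h0 : ¬ rem = 0) (h1 : min nxt rem < 1) : Psub rem nxt = [] := by
  rw [Psub, if_neg h0, if_pos h1]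

-- Psub only depends on the capped bound
theorem Psub_min (rem nxt : Int) : Psub rem nxt = Psub rem (min nxt rem) := by
  by_cases h0 : rem = 0
  · subst h0
    rw [Psub_zero, Psub_zero]
  · have hm : min (min nxt rem) rem = min nxt rem := by omega
    by_cases h1 : 1 ≤ min nxt rem
    · rw [Psub_eq rem nxt h0 h1, Psub_eq rem (min nxt rem) h0 (by omega), hm]
    · rw [Psub_nil rem nxt h0 (by omega), Psub_nil rem (min nxt rem) h0 (by omega)]

-- peeling the largest part off Psub
theorem Psub_split (rem nxt : Int) (h0 : ¬ rem = 0) (h1 : 1 ≤ min nxt rem) :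
    Psub rem nxt = (Psub (rem - min nxt rem) (min nxt rem)).map (fun r => min nxt rem :: r)
      ++ Psub rem (min nxt rem - 1) := by
  have hmr : min nxt rem ≤ rem := min_le_right _ _
  rw [Psub_eq rem nxt h0 h1]
  rw [PySem.List.pyRange_neg_one_cons (by omega)]
  rw [List.map_cons, List.flatten_cons]
  congr 1
  by_cases hm1 : min nxt rem = 1
  · rw [hm1]
    rw [PySem.List.pyRange_neg_one_eq_nil (by omega)]
    rw [Psub, if_neg h0, if_pos (by omega)]
    simp
  · have hmin : min (min nxt rem - 1) rem = min nxt rem - 1 := by omega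
    rw [Psub_eq rem (min nxt rem - 1) h0 (by omega), hmin]

theorem foldl_append_flatMap {α β : Type} (f : α → List β) :
    ∀ (l : List α) (acc : List β), l.foldl (fun acc i => acc ++ f i) acc = acc ++ l.flatMap f := by
  intro l
  induction l with
  | nil => intro acc; simp
  | cons a l ih => intro acc; simp [List.foldl_cons, ih, List.flatMap_cons]

-- A computes Psub
theorem get_to_eq_Psub (n : Nat) : ∀ (c : Int), 1 ≤ c →
    get_to (n : Int) (some c) = Psub (n : Int) c := by
  induction n using Nat.strong_induction_on with
  | _ n IH =>
    intro c hc
    by_cases h0 : (n : Int) = 0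
    · rw [get_to, Psub]
      simp [h0]
    · by_cases h1 : (n : Int) = 1
      · have hn : n = 1 := by omega
        subst hn
        have h1' : ((1 : Nat) : Int) = 1 := by norm_num
        have e1 : Psub 0 1 = [[]] := by rw [Psub]; simp
        have e2 : Psub 1 0 = [] := by rw [Psub]; norm_num
        have hm : min c (1 : Int) = 1 := by omega
        rw [h1', get_to, Psub_split 1 c (by norm_num) (by omega), hm]
        norm_num [e1, e2]
      · -- n ≥ 2
        have hn2 : 2 ≤ n := by omega
        have hcap : pyCap (n : Int) (some c) = min c (n : Int) := by
          simp only [pyCap]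
          split <;> omega
        have hmge : 1 ≤ min c (n : Int) := by omega
        rw [get_to]
        simp only [h0, if_false, h1, if_false]
        rw [List.foldl_attach (f := fun acc i => acc ++ (get_to ((n : Int) - i) (some i)).map (fun rest => i :: rest))]
        rw [foldl_append_flatMap, List.nil_append]
        rw [Psub_eq (n : Int) c h0 hmge, ← List.flatMap_def]
        rw [List.flatMap_def, List.flatMap_def, hcap]
        congr 1
        apply List.map_congr_left
        intro j hj
        have hmem := PySem.List.mem_pyRange_neg_one.mp hj
        have hjn : j ≤ (n : Int) := by
          have : min c (n : Int) ≤ (n : Int) := min_le_right _ _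
          omega
        have hcast : (n : Int) - j = ((n - j.toNat : Nat) : Int) := by omega
        rw [hcast, IH (n - j.toNat) (by omega) j (by omega)]

-- A equals Psub at the normalised cap, for every target except 1
theorem A_eq_Psub (t : Int) (wf : Option Int) (h1 : ¬ t = 1) :
    get_to t wf = Psub t (pyCap t wf) := by
  by_cases h0 : t = 0
  · rw [get_to, Psub]
    simp [h0]
  · have hle : pyCap t wf ≤ t := by
      have := pyCap_le t wf
      omega
    by_cases hc : 1 ≤ pyCap t wf
    · have ht2 : 2 ≤ t := by omega
      obtain ⟨cap, hcapdef⟩ : ∃ cap, pyCap t wf = cap := ⟨_, rfl⟩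
      rw [hcapdef] at hc hle ⊢
      have hgen : pyCap t (some cap) = cap := by
        simp only [pyCap]
        split <;> omega
      have hAA : get_to t wf = get_to t (some cap) := by
        conv_rhs => rw [get_to]
        rw [get_to]
        simp only [h0, if_false, h1, if_false]
        rw [hgen, hcapdef]
      have hcast : t = ((t.toNat : Nat) : Int) := by omega
      rw [hAA, hcast, get_to_eq_Psub t.toNat cap hc]
    · rw [get_to]
      simp only [h0, if_false, h1, if_false]
      have hA : PySem.List.pyRange (pyCap t wf) 0 (-1) = [] :=
        PySem.List.pyRange_neg_one_eq_nil (by omega)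
      rw [hA]
      rw [Psub, if_neg h0, if_pos (by
        have : min (pyCap t wf) t ≤ pyCap t wf := min_le_left _ _
        omega)]
      simp

-- ===== B's table =====
theorem consToList_id (l : List Int) : consToList l = l := by
  induction l with
  | nil => rfl
  | cons c q ih => rw [consToList, ih]

-- what row m of B's table holds: the partitions of m with parts ≤ c, for each c ≤ min m capN
def rowSpecC (capN : Nat) (m : Nat) : List (List (List Int)) :=
  (List.range (min m capN + 1)).map (fun c : Nat => Psub (m : Int) (c : Int))

theorem getD_map_range {α : Type} (f : Nat → α) (d : α) (m i : Nat) (h : i < m) :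
    ((List.range m).map f).getD i d = f i := by
  rw [List.getD_eq_getElem?_getD, List.getElem?_map, List.getElem?_range h]
  rfl

-- invariant of the inner loop (rowStep) over row m
theorem inner_inv (m capN : Nat) (hm : 1 ≤ m) (t : List (List (List (List Int))))
    (ht : t = (List.range m).map (rowSpecC capN)) :
    ∀ j, j ≤ min m capN → (List.range j).foldl (rowStep t m) ([[]], [])
      = ((List.range (j + 1)).map (fun c : Nat => Psub (m : Int) (c : Int)), Psub (m : Int) (j : Int)) := by
  intro j
  induction j with
  | zero =>
    intro _
    have h0 : Psub (m : Int) 0 = [] :=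
      Psub_nil _ _ (by omega) (by omega)
    simp [h0]
  | succ j ih =>
    intro hj
    rw [List.range_succ, List.foldl_append, List.foldl_cons, List.foldl_nil, ih (by omega)]
    simp only [rowStep]
    have hc1 : m - (j + 1) < m := by omega
    rw [ht, getD_map_range (rowSpecC capN) [] m (m - (j + 1)) hc1]
    rw [rowSpecC, getD_map_range _ [] (min (m - (j + 1)) capN + 1) (min (j + 1) (m - (j + 1))) (by omega)]
    have hcast1 : ((m - (j + 1) : Nat) : Int) = (m : Int) - ((j + 1 : Nat) : Int) := by omega
    have hcast2 : ((min (j + 1) (m - (j + 1)) : Nat) : Int)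
        = min ((j + 1 : Nat) : Int) ((m : Int) - ((j + 1 : Nat) : Int)) := by omega
    rw [hcast1, hcast2, ← Psub_min ((m : Int) - ((j + 1 : Nat) : Int)) ((j + 1 : Nat) : Int)]
    have hsplit := Psub_split (m : Int) ((j + 1 : Nat) : Int) (by omega) (by omega)
    have hmin : min ((j + 1 : Nat) : Int) (m : Int) = ((j + 1 : Nat) : Int) := by omega
    rw [hmin] at hsplit
    have hj1 : ((j + 1 : Nat) : Int) - 1 = ((j : Nat) : Int) := by omega
    rw [hj1] at hsplit
    rw [← hsplit]
    simp [List.range_succ]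

-- invariant of the outer loop: the table after k rows
theorem table_inv (capN : Nat) : ∀ (k : Nat),
    (List.range k).foldl (fun t m0 => t ++ [rowB t (m0 + 1) (min (m0 + 1) capN)]) [[[[]]]]
      = (List.range (k + 1)).map (rowSpecC capN) := by
  intro k
  induction k with
  | zero =>
    have h0 : rowSpecC capN 0 = [[[]]] := by
      rw [rowSpecC]
      simp [Psub_zero]
    simp [h0]
  | succ k ih =>
    rw [List.range_succ, List.foldl_append, List.foldl_cons, List.foldl_nil, ih]
    have hrow : rowB ((List.range (k + 1)).map (rowSpecC capN)) (k + 1) (min (k + 1) capN)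
        = rowSpecC capN (k + 1) := by
      rw [rowB, inner_inv (k + 1) capN (by omega) _ rfl (min (k + 1) capN) (le_refl _)]
      rw [rowSpecC]
    rw [hrow]
    simp [List.range_succ]

-- ===== VERDICT (by name: the statement is the Claim_ definition above) =====
theorem get_to_spec : Claim_equal_get_to := by
  intro target wf _ _
  unfold Spec_get_to get_to_alt
  by_cases h1 : target = 1
  · rw [get_to]
    simp [h1]
  · rw [if_neg h1, A_eq_Psub target wf h1]
    have hle : pyCap target wf ≤ target := by
      have := pyCap_le target wf
      omega
    by_cases hd : target ≤ 0 ∨ pyCap target wf ≤ 0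
    · rw [if_pos hd]
      by_cases h0 : target = 0
      · rw [if_pos h0, h0, Psub_zero]
      · rw [if_neg h0, Psub_nil target (pyCap target wf) h0 (by omega)]
    · rw [if_neg hd]
      rw [not_or] at hd
      rw [table_inv (pyCap target wf).toNat target.toNat]
      rw [getD_map_range (rowSpecC (pyCap target wf).toNat) [] (target.toNat + 1) target.toNat (by omega)]
      rw [rowSpecC]
      rw [getD_map_range _ [] (min target.toNat (pyCap target wf).toNat + 1)
        (min (pyCap target wf) target).toNat (by omega)]
      have hc1 : ((target.toNat : Nat) : Int) = target := by omega
      have hc2 : (((min (pyCap target wf) target).toNat : Nat) : Int) = pyCap target wf := by omega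
      have hmap : ∀ L : List (List Int), L.map consToList = L := by
        intro L
        induction L with
        | nil => rfl
        | cons a L ih => rw [List.map_cons, consToList_id, ih]
      rw [hc1, hc2, hmap]
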